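-- pv_equiv track=rewrite | github.com/seungh0/programmers-algorithm | 20201220/greed.py | solution
-- ===== SOURCE A (Python) =====
-- def solution(n):
--     coins = [500, 100, 50, 10]
--     count = 0
--     for coin in coins:
--         cnt = n // coin
--         n -= cnt * coin
--         count += cnt
--     return count
-- ===== SOURCE B (Python) =====
-- def solution(n):
--     # Aggregate-count identity: instead of a greedy loop peeling off remainders,
--     # the total coin count is a fixed weighted sum of floor-counts of the original n:
--     # each term n//d counts how many multiples of d fit, and the weights cancel the
--     # overlap between denominations (valid for all ints under floor division).
--     return sum(w * (n // d) for w, d in ((1, 10), (-4, 50), (-1, 100), (-4, 500)))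
-- ===== Notes on version B (the rewrite author's own statement) =====
-- stated objective: alternative
-- what changed: Replaced the greedy loop with its mutable shrinking remainder by a weighted sum of independent floor-counts n//d over the original n (weights 1,-4,-1,-4 cancel denomination overlaps), so no remainder is ever computed.
import Mathlib
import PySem

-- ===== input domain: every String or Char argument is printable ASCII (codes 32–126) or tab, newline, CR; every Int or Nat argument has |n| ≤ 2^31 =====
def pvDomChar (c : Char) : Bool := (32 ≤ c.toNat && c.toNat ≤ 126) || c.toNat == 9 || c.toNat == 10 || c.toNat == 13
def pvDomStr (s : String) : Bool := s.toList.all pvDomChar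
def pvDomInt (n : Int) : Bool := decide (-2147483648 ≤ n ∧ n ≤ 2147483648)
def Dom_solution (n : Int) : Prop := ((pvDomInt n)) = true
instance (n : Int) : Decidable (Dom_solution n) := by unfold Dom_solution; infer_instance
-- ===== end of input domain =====

-- B replaces A's greedy remainder loop by a weighted sum of independent floor-counts of the original n (objective: alternative).

-- ===== PORT A =====
def solution (n : Int) : Int :=
  let coins : List Int := [500, 100, 50, 10]
  let r := coins.foldl (fun (st : Int × Int) coin =>
    let cnt := PySem.Int.floordiv st.1 coin
    (st.1 - cnt * coin, st.2 + cnt)) (n, 0)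
  r.2

-- ===== PORT B =====
def solution_alt (n : Int) : Int :=
  ([((1 : Int), (10 : Int)), (-4, 50), (-1, 100), (-4, 500)]).foldl
    (fun acc wd => acc + wd.1 * PySem.Int.floordiv n wd.2) 0

-- ===== PRECONDITION & SPEC =====
def Spec_solution (n : Int) (out : Int) : Prop := out = solution_alt n
instance (n : Int) (out : Int) : Decidable (Spec_solution n out) := by unfold Spec_solution; infer_instance

-- ===== CLAIM (what is proved, stated in full; the proofs are below) =====
def Claim_equal_solution : Prop := ∀ (n : Int), Dom_solution n → Spec_solution n (solution n)

-- ===== LEMMAS AND PROOFS =====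

-- ===== VERDICT (by name: the statement is the Claim_ definition above) =====
theorem solution_spec : Claim_equal_solution := by
  intro n _
  unfold Spec_solution solution solution_alt
  simp only [List.foldl]
  rw [PySem.Int.floordiv_eq_ediv_of_pos (a := n) (by norm_num : (0:Int) < 500)]
  rw [show n - n / 500 * 500 = n % 500 by omega]
  rw [PySem.Int.floordiv_eq_ediv_of_pos (by norm_num : (0:Int) < 100)]
  rw [show n % 500 - n % 500 / 100 * 100 = n % 100 by omega]
  rw [PySem.Int.floordiv_eq_ediv_of_pos (by norm_num : (0:Int) < 50)]
  rw [show n % 100 - n % 100 / 50 * 50 = n % 50 by omega]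
  rw [PySem.Int.floordiv_eq_ediv_of_pos (by norm_num : (0:Int) < 10)]
  rw [PySem.Int.floordiv_eq_ediv_of_pos (by norm_num : (0:Int) < 10),
      PySem.Int.floordiv_eq_ediv_of_pos (by norm_num : (0:Int) < 50),
      PySem.Int.floordiv_eq_ediv_of_pos (by norm_num : (0:Int) < 100)]
  omega
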